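-- pv_equiv track=rewrite | github.com/Deedss/AdventOfCode2021 | 3_1.py | calculateEpsilon
-- ===== SOURCE A (Python) =====
-- def calculateEpsilon(binaries):
--     epsilon = ''
--     for i in range(0, len(binaries[0])):
--         count = {'0': 0, '1': 0 }
--         for binary in binaries:
--             if binary[i] == '0':
--                 count['0'] = count['0'] + 1
--             else:
--                 count['1'] = count['1'] + 1
--
--         if count['0'] < count['1']:
--             epsilon = epsilon + '0'
--         else:
--             epsilon = epsilon + '1'
--
--     return int(epsilon, 2)
-- ===== SOURCE B (Python) =====
-- def calculateEpsilon(binaries):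
--     n = len(binaries)
--     counts = [0] * len(binaries[0])
--     for s in binaries:
--         counts = [c + (s[j] != '0') for j, c in enumerate(counts)]
--     epsilon = ''.join('0' if 2 * c > n else '1' for c in counts)
--     return int(epsilon, 2)
-- ===== Notes on version B (the rewrite author's own statement) =====
-- stated objective: alternative
-- what changed: A rescans the whole list once per column with a fresh {'0','1'} dict each time; B makes one row-major pass maintaining a per-column tally list, then a separate pass over the tally builds epsilon ('0' iff ones strictly exceed half, reproducing A's tie-goes-to-'1') before the same int(.,2) conversion.
import Mathlib
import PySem

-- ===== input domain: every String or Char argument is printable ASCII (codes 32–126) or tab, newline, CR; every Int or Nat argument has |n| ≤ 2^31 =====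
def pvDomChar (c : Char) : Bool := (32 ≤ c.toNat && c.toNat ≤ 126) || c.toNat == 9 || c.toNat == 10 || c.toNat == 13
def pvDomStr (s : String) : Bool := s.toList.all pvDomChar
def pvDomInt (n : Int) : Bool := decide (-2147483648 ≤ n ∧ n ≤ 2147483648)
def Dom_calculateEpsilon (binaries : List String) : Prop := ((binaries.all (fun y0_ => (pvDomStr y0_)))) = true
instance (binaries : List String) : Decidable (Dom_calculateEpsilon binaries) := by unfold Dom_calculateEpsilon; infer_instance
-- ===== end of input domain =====

-- B replaces A's per-column rescans of the whole list by one row-major tally pass over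
-- the strings plus a separate pass turning the tally into the epsilon string (alternative
-- decomposition; equivalence of the RETURN value is what is proved).

-- ===== PORT A =====
def calculateEpsilon (binaries : List String) : Int :=
  let first := (PySem.List.pyGet? binaries 0).getD ""
  let epsilon := (PySem.List.pyRange 0 (PySem.Str.len first) 1).foldl
    (fun epsilon i =>
      let count0 : PySem.Dict String Int :=
        (PySem.Dict.empty.insert "0" 0).insert "1" 0
      let count := binaries.foldl (fun count binary =>
        if PySem.Str.pyGet? binary i = some '0' then
          count.insert "0" (count.getD "0" 0 + 1)
        else
          count.insert "1" (count.getD "1" 0 + 1)) count0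
      if count.getD "0" 0 < count.getD "1" 0 then epsilon ++ "0" else epsilon ++ "1")
    ""
  (PySem.Int.ofStrBase? epsilon 2).getD 0

-- ===== PORT B =====
def calculateEpsilon_alt (binaries : List String) : Int :=
  let n : Int := binaries.length
  let counts0 : List Int :=
    List.replicate (PySem.Str.len ((PySem.List.pyGet? binaries 0).getD "")).toNat 0
  let counts := binaries.foldl (fun counts s =>
    (PySem.List.enumerate counts 0).map (fun jc =>
      jc.2 + (if PySem.Str.pyGet? s jc.1 ≠ some '0' then 1 else 0))) counts0
  let epsilon := PySem.Str.join "" (counts.map (fun c => if 2 * c > n then "0" else "1"))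
  (PySem.Int.ofStrBase? epsilon 2).getD 0

-- ===== PRECONDITION & SPEC =====
-- Pre_ excludes exactly the inputs on which the Python A raises: the empty list
-- (IndexError on binaries[0]), an empty first string (ValueError from int('', 2)),
-- and lists containing a string shorter than the first (IndexError on binary[i]).
def Pre_calculateEpsilon (binaries : List String) : Prop :=
  binaries ≠ [] ∧ 0 < ((binaries.headD "").toList.length) ∧
    ∀ s ∈ binaries, (binaries.headD "").toList.length ≤ s.toList.length
instance (binaries : List String) : Decidable (Pre_calculateEpsilon binaries) := by
  unfold Pre_calculateEpsilon; infer_instance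

def pvWitness_calculateEpsilon : List String := ["01", "10", "11"]

def Spec_calculateEpsilon (binaries : List String) (out : Int) : Prop := out = calculateEpsilon_alt binaries
instance (binaries : List String) (out : Int) : Decidable (Spec_calculateEpsilon binaries out) := by unfold Spec_calculateEpsilon; infer_instance

-- ===== CLAIM (what is proved, stated in full; the proofs are below) =====
def Claim_equal_calculateEpsilon : Prop := ∀ (binaries : List String), Dom_calculateEpsilon binaries → Pre_calculateEpsilon binaries → Spec_calculateEpsilon binaries (calculateEpsilon binaries)

-- ===== LEMMAS AND PROOFS =====

-- the per-column zero/one tally of A's inner dict loop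
theorem dictCount_spec (l : List String) (i : Int) (d : PySem.Dict String Int) :
    (l.foldl (fun count binary =>
        if PySem.Str.pyGet? binary i = some '0' then
          count.insert "0" (count.getD "0" 0 + 1)
        else
          count.insert "1" (count.getD "1" 0 + 1)) d).getD "0" 0
      = d.getD "0" 0 + (l.countP (fun s => PySem.Str.pyGet? s i == some '0') : Int)
    ∧ (l.foldl (fun count binary =>
        if PySem.Str.pyGet? binary i = some '0' then
          count.insert "0" (count.getD "0" 0 + 1)
        else
          count.insert "1" (count.getD "1" 0 + 1)) d).getD "1" 0
      = d.getD "1" 0 + (l.countP (fun s => !(PySem.Str.pyGet? s i == some '0')) : Int) := by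
  induction l generalizing d with
  | nil => simp
  | cons s t ih =>
    simp only [List.foldl_cons, List.countP_cons]
    by_cases h : PySem.Str.pyGet? s i = some '0'
    · have hb : (PySem.Str.pyGet? s i == some '0') = true := beq_iff_eq.mpr h
      obtain ⟨ih0, ih1⟩ := ih (d.insert "0" (d.getD "0" 0 + 1))
      rw [if_pos h]
      refine ⟨?_, ?_⟩
      · rw [ih0, PySem.Dict.getD_insert, if_pos rfl, hb]
        simp <;> push_cast <;> omega
      · rw [ih1, PySem.Dict.getD_insert, if_neg (by decide), hb]
        simp <;> push_cast <;> omega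
    · have hb : (PySem.Str.pyGet? s i == some '0') = false := beq_eq_false_iff_ne.mpr h
      obtain ⟨ih0, ih1⟩ := ih (d.insert "1" (d.getD "1" 0 + 1))
      rw [if_neg h]
      refine ⟨?_, ?_⟩
      · rw [ih0, PySem.Dict.getD_insert, if_neg (by decide), hb]
        simp <;> push_cast <;> omega
      · rw [ih1, PySem.Dict.getD_insert, if_pos rfl, hb]
        simp <;> push_cast <;> omega

-- A's epsilon, as a character list
theorem epsA_chars (l : List Int) (P : Int → Prop) [DecidablePred P] (e : String) :
    (l.foldl (fun e i => if P i then e ++ "0" else e ++ "1") e).toList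
      = e.toList ++ l.map (fun i => if P i then '0' else '1') := by
  induction l generalizing e with
  | nil => simp
  | cons i t ih =>
    by_cases h : P i <;> simp [h, ih]

-- one row-major step of B's tally over a tabulated counts list
theorem stepB_map_range (w : Nat) (f : Nat → Int) (s : String) :
    (PySem.List.enumerate ((List.range w).map f) 0).map (fun jc =>
        jc.2 + (if PySem.Str.pyGet? s jc.1 ≠ some '0' then 1 else 0))
      = (List.range w).map (fun j =>
          f j + (if PySem.Str.pyGet? s (j : Int) ≠ some '0' then 1 else 0)) := by
  rw [PySem.List.enumerate_eq_map_pyRange (d := 0)]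
  simp only [PySem.List.len_eq, List.length_map, List.length_range,
    PySem.List.pyRange_zero_nat, List.map_map]
  refine List.map_congr_left ?_
  intro j hj
  simp only [List.mem_range] at hj
  simp [PySem.List.pyGetD_natCast, List.getD_eq_getElem?_getD, hj]

-- B's whole tally loop, in closed form
theorem countsB_spec (l : List String) (w : Nat) (f : Nat → Int) :
    l.foldl (fun counts s =>
        (PySem.List.enumerate counts 0).map (fun jc =>
          jc.2 + (if PySem.Str.pyGet? s jc.1 ≠ some '0' then 1 else 0)))
      ((List.range w).map f)
      = (List.range w).map (fun j =>
          f j + (l.countP (fun s => !(PySem.Str.pyGet? s (j : Int) == some '0')) : Int)) := by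
  induction l generalizing f with
  | nil => simp
  | cons s t ih =>
    simp only [List.foldl_cons, stepB_map_range, ih]
    refine List.map_congr_left ?_
    intro j hj
    by_cases h : PySem.Str.pyGet? s (j : Int) = some '0' <;>
      simp [List.countP_cons, h] <;> push_cast <;> ring

-- flatten ignores an interspersed empty separator
theorem flatten_intersperse_nil (ps : List (List Char)) :
    (List.intersperse [] ps).flatten = ps.flatten := by
  induction ps with
  | nil => rfl
  | cons p q ih =>
    cases q with
    | nil => rfl
    | cons r rs => simp only [List.intersperse_cons₂, List.flatten_cons] at ih ⊢; simp [ih]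

-- B's join of one-character strings, as a character list
theorem joinB_chars (l : List Int) (P : Int → Prop) [DecidablePred P] :
    (PySem.Str.join "" (l.map (fun c => if P c then "0" else "1"))).toList
      = l.map (fun c => if P c then '0' else '1') := by
  have h : ∀ (ps : List String),
      (PySem.Str.join "" ps).toList = (ps.map String.toList).flatten := by
    intro ps
    simp [PySem.Str.join, PySem.Chars.join, List.intercalate, flatten_intersperse_nil]
  rw [h, List.map_map]
  induction l with
  | nil => rfl
  | cons c t ih => by_cases hc : P c <;> simp [Function.comp, hc, ih]

theorem counts_split (l : List String) (j : Nat) :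
    (l.countP (fun s => PySem.Str.pyGet? s (j : Int) == some '0'))
      + (l.countP (fun s => !(PySem.Str.pyGet? s (j : Int) == some '0'))) = l.length := by
  induction l with
  | nil => simp
  | cons s t ih =>
    cases hb : (PySem.Str.pyGet? s (j : Int) == some '0') <;>
      simp only [List.countP_cons, List.length_cons, hb, Bool.not_true, Bool.not_false,
        if_true, if_false, Bool.false_eq_true, Bool.true_eq_false, ite_true, ite_false] <;>
      omega

theorem calculateEpsilon_eq_alt (binaries : List String) :
    calculateEpsilon binaries = calculateEpsilon_alt binaries := by
  simp only [calculateEpsilon, calculateEpsilon_alt, PySem.Str.len_eq, Int.toNat_natCast,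
    PySem.List.pyRange_zero_nat]
  set first := (PySem.List.pyGet? binaries 0).getD "" with hfirst
  set w := first.toList.length with hw
  set n : Int := (binaries.length : Int) with hn
  have hrep : List.replicate w (0 : Int) = (List.range w).map (fun _ => (0 : Int)) := by
    rw [List.map_const', List.length_range]
  rw [hrep, countsB_spec]
  simp only [PySem.Int.ofStrBase?]
  refine congrArg (fun cs => (PySem.Int.ofCharsBase? cs 2).getD 0) ?_
  rw [epsA_chars, joinB_chars]
  simp only [String.toList_empty, List.nil_append, List.map_map]
  refine List.map_congr_left ?_
  intro j hj
  have h0 := dictCount_spec binaries (j : Int)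
      ((PySem.Dict.empty.insert "0" 0).insert "1" 0)
  obtain ⟨h0, h1⟩ := h0
  have hd0 : ((PySem.Dict.empty.insert "0" (0:Int)).insert "1" 0).getD "0" 0 = 0 := by decide
  have hd1 : ((PySem.Dict.empty.insert "0" (0:Int)).insert "1" 0).getD "1" 0 = 0 := by decide
  rw [hd0] at h0; rw [hd1] at h1
  have hsplit := counts_split binaries j
  simp only [Function.comp, h0, h1]
  by_cases hlt : (0:Int) + (binaries.countP (fun s => PySem.Str.pyGet? s (j : Int) == some '0') : Int)
      < 0 + (binaries.countP (fun s => !(PySem.Str.pyGet? s (j : Int) == some '0')) : Int)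
  · rw [if_pos hlt, if_pos (by push_cast at hlt ⊢; omega)]
  · rw [if_neg hlt, if_neg (by push_cast at hlt ⊢; omega)]

-- ===== VERDICT (by name: the statement is the Claim_ definition above) =====
theorem calculateEpsilon_spec : Claim_equal_calculateEpsilon := by
  intro binaries _ _
  exact calculateEpsilon_eq_alt binaries
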